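-- pv_equiv track=rewrite | github.com/mhaselmann/advent-of-code | day10_syntax_scoring/answer.py | score_erronous_chars
-- ===== SOURCE A (Python) =====
-- def score_erronous_chars(erronous_chars: list[str]) -> int:
--     score = 0
--     for c in erronous_chars:
--         if c == ")":
--             score += 3
--         elif c == "]":
--             score += 57
--         elif c == "}":
--             score += 1197
--         elif c == ">":
--             score += 25137
--         else:
--             raise ValueError(f"{c} can not be scored")
--     return score
-- ===== SOURCE B (Python) =====
-- def score_erronous_chars(erronous_chars: list[str]) -> int:
--     counts = {}
--     for c in erronous_chars:
--         counts[c] = counts.get(c, 0) + 1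
--     for c in counts:
--         if c not in (")", "]", "}", ">"):
--             raise ValueError(f"{c} can not be scored")
--     return (
--         counts.get(")", 0) * 3
--         + counts.get("]", 0) * 57
--         + counts.get("}", 0) * 1197
--         + counts.get(">", 0) * 25137
--     )
-- ===== Notes on version B (the rewrite author's own statement) =====
-- stated objective: alternative
-- what changed: Replaces the per-element branching accumulation with a count-then-combine pass: build a frequency dict of the characters, validate the distinct keys, and return a fixed weighted sum of the four counts.
import Mathlib
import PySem

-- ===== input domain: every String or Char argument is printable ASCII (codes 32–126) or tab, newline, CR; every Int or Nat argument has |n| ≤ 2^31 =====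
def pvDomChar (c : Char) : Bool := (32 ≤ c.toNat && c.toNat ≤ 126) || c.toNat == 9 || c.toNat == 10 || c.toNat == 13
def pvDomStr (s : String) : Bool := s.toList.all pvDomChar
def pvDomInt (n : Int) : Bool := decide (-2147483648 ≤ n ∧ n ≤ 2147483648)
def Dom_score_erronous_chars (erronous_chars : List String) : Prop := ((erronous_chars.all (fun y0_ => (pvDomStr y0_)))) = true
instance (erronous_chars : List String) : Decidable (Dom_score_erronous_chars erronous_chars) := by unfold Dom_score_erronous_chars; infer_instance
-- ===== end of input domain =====

-- B changes the decomposition (count-then-combine instead of per-element branching); equivalence of RETURN values on inputs where A does not raise.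

-- ===== PORT A =====
-- the for-loop with its running score; 'none' is the ValueError path
def scoreLoopA : Int → List String → Option Int
  | score, [] => some score
  | score, c :: rest =>
    if c = ")" then scoreLoopA (score + 3) rest
    else if c = "]" then scoreLoopA (score + 57) rest
    else if c = "}" then scoreLoopA (score + 1197) rest
    else if c = ">" then scoreLoopA (score + 25137) rest
    else none

def score_erronous_chars (erronous_chars : List String) : Int :=
  (scoreLoopA 0 erronous_chars).getD 0

-- ===== PORT B =====
-- counts[c] = counts.get(c, 0) + 1 over the list
def bCounts (erronous_chars : List String) : PySem.Dict String Int :=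
  erronous_chars.foldl (fun d c => d.insert c (d.getD c 0 + 1)) PySem.Dict.empty

def bValidChar (c : String) : Bool := c == ")" || c == "]" || c == "}" || c == ">"

-- the validation loop over the dict's keys ('none' = ValueError), then the weighted sum
def bBody (counts : PySem.Dict String Int) : Option Int :=
  if counts.keys.all bValidChar then
    some (counts.getD ")" 0 * 3 + counts.getD "]" 0 * 57
          + counts.getD "}" 0 * 1197 + counts.getD ">" 0 * 25137)
  else none

def score_erronous_chars_alt (erronous_chars : List String) : Int :=
  (bBody (bCounts erronous_chars)).getD 0

-- ===== PRECONDITION & SPEC =====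
-- Pre_ excludes exactly the inputs on which A raises ValueError (a char outside ")]}>")
def Pre_score_erronous_chars (erronous_chars : List String) : Prop :=
  erronous_chars.all (fun c => c == ")" || c == "]" || c == "}" || c == ">") = true
instance (erronous_chars : List String) : Decidable (Pre_score_erronous_chars erronous_chars) := by
  unfold Pre_score_erronous_chars; infer_instance

def pvWitness_score_erronous_chars : List String := [")", "]", "}", ">", ")"]

def Spec_score_erronous_chars (erronous_chars : List String) (out : Int) : Prop := out = score_erronous_chars_alt erronous_chars
instance (erronous_chars : List String) (out : Int) : Decidable (Spec_score_erronous_chars erronous_chars out) := by unfold Spec_score_erronous_chars; infer_instance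

-- ===== CLAIM (what is proved, stated in full; the proofs are below) =====
def Claim_equal_score_erronous_chars : Prop := ∀ (erronous_chars : List String), Dom_score_erronous_chars erronous_chars → Pre_score_erronous_chars erronous_chars → Spec_score_erronous_chars erronous_chars (score_erronous_chars erronous_chars)

-- ===== LEMMAS AND PROOFS =====

-- A's loop on a fully valid list adds 3/57/1197/25137 per occurrence of each symbol
theorem scoreLoopA_valid (l : List String) : ∀ s : Int,
    l.all (fun c => c == ")" || c == "]" || c == "}" || c == ">") = true →
    scoreLoopA s l = some (s + 3 * l.count ")" + 57 * l.count "]"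
      + 1197 * l.count "}" + 25137 * l.count ">") := by
  induction l with
  | nil => intro s _; simp [scoreLoopA]
  | cons c rest ih =>
    intro s hall
    simp only [List.all_cons, Bool.and_eq_true] at hall
    obtain ⟨hc, hrest⟩ := hall
    simp only [Bool.or_eq_true, beq_iff_eq] at hc
    rcases hc with ((h | h) | h) | h <;>
      (subst h
       simp [scoreLoopA, ih _ hrest]
       ring)

theorem bCounts_eq_counter (l : List String) : bCounts l = PySem.Dict.counter l := by
  simpa [bCounts] using PySem.Dict.foldl_insert_getD_add_one_eq_counter l

theorem score_erronous_chars_spec : Claim_equal_score_erronous_chars := by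
  intro l _ hpre
  unfold Pre_score_erronous_chars at hpre
  unfold Spec_score_erronous_chars score_erronous_chars score_erronous_chars_alt
  rw [scoreLoopA_valid l 0 hpre, bCounts_eq_counter, bBody]
  have hkeys : (PySem.Dict.counter l).keys.all bValidChar = true := by
    rw [PySem.Dict.keys_counter]
    rw [List.all_eq_true] at hpre ⊢
    intro c hc
    exact hpre c ((PySem.Set.mem_ofList l c).mp hc)
  rw [if_pos hkeys]
  simp only [PySem.Dict.getD_counter, Option.getD_some]
  ring
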